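-- pv_equiv track=rewrite | github.com/Ciamma/Introduzione-alla-Programmazione-2016-17 | homework01/program03.py | parole
-- ===== SOURCE A (Python) =====
-- def noalpha(s):
--     '''Ritorna una stringa contenente tutti i caratteri non
--     alfabetici contenuti in s, senza ripetizioni'''
--     noa = ''
--     for c in s:
--         if not (c in noa or c.isalpha()):
--             noa += c
--     return noa
--
-- def words(s):
--     '''Ritorna la lista delle parole contenute nella stringa s'''
--     noa = noalpha(s)
--     for c in noa:
--         s = s.replace(c, ' ')
--     return s.split()
--
-- def parole(a,b,txt):
--     List = []
--     righe = txt.splitlines()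
--     for r in righe:
--         ww = words(r)
--         parola = ''
--         for w in ww:
--             if a <= len(w) <= b:
--                 if parola == '':
--                     parola = w
--                 else:
--                     parola = parola + ' ' + w
--         List.append(parola)
--     return List
-- ===== SOURCE B (Python) =====
-- def parole(a, b, txt):
--     res = []
--     for line in txt.splitlines():
--         parts = []
--         buf = ''
--         for c in line:
--             if c.isalpha():
--                 buf += c
--             else:
--                 if buf and a <= len(buf) <= b:
--                     parts.append(buf)
--                 buf = ''
--         if buf and a <= len(buf) <= b:
--             parts.append(buf)
--         res.append(' '.join(parts))
--     return res
-- ===== Notes on version B (the rewrite author's own statement) =====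
-- stated objective: alternative
-- what changed: Replaces A's per-line pipeline (collect distinct non-alphabetic chars, one str.replace pass per such char, split, then a separate filter-and-join loop) with a single character scan per line that accumulates a word buffer, flushes it through the length filter at each non-alphabetic char, and joins the kept words with ' '.join.
import Mathlib
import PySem

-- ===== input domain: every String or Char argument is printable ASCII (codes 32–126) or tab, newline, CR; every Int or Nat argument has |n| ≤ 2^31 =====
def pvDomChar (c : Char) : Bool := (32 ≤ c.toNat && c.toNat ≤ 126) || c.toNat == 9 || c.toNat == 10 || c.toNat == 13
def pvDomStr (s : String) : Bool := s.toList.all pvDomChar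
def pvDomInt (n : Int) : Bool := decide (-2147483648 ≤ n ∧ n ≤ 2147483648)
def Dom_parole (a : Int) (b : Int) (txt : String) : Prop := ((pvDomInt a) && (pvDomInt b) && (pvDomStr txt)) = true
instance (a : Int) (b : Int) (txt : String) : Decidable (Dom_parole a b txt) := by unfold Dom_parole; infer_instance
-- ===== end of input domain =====

-- B replaces A's per-line pipeline (distinct non-alpha chars + one replace pass per char + split + separate filter/join loop)
-- with a single character scan per line (buffer, flush-with-length-check, ' '.join): an alternative one-pass decomposition.

-- ===== PORT A =====
-- a <= len(w) <= b
def pvLenOk (a : Int) (b : Int) (w : List Char) : Bool :=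
  decide (a ≤ (w.length : Int)) && decide ((w.length : Int) ≤ b)

-- def noalpha(s): the loop accumulating distinct non-alphabetic characters
def noalphaA (s : List Char) : List Char :=
  s.foldl (fun noa c =>
    if !(PySem.Chars.isIn [c] noa || PySem.Chars.isalpha c) then noa ++ [c] else noa) []

-- def words(s): replace every collected char by ' ' (one pass per char), then split()
def wordsA (s : List Char) : List (List Char) :=
  PySem.Chars.split₀ ((noalphaA s).foldl (fun t c => PySem.Chars.replace t [c] [' ']) s)

-- the inner 'for w in ww' loop building parola
def lineA (a : Int) (b : Int) (r : List Char) : List Char :=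
  (wordsA r).foldl (fun parola w =>
    if pvLenOk a b w then (if parola = [] then w else parola ++ ' ' :: w) else parola) []

def parole (a : Int) (b : Int) (txt : String) : List String :=
  (PySem.Chars.splitlines txt.toList).map (fun r => String.mk (lineA a b r))

-- ===== PORT B =====
-- flush: append buf to parts if buf nonempty and a <= len(buf) <= b
def flushB (a : Int) (b : Int) (st : List (List Char) × List Char) : List (List Char) :=
  if !st.2.isEmpty && pvLenOk a b st.2 then st.1 ++ [st.2] else st.1

def stepB (a : Int) (b : Int) (st : List (List Char) × List Char) (c : Char) :
    List (List Char) × List Char :=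
  if PySem.Chars.isalpha c then (st.1, st.2 ++ [c]) else (flushB a b st, [])

def lineB (a : Int) (b : Int) (r : List Char) : List Char :=
  PySem.Chars.join [' '] (flushB a b (r.foldl (stepB a b) ([], [])))

def parole_alt (a : Int) (b : Int) (txt : String) : List String :=
  (PySem.Chars.splitlines txt.toList).map (fun r => String.mk (lineB a b r))

-- ===== PRECONDITION & SPEC =====
def Spec_parole (a : Int) (b : Int) (txt : String) (out : List String) : Prop := out = parole_alt a b txt
instance (a : Int) (b : Int) (txt : String) (out : List String) : Decidable (Spec_parole a b txt out) := by unfold Spec_parole; infer_instance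

-- ===== CLAIM (what is proved, stated in full; the proofs are below) =====
def Claim_equal_parole : Prop := ∀ (a : Int) (b : Int) (txt : String), Dom_parole a b txt → Spec_parole a b txt (parole a b txt)

-- ===== LEMMAS AND PROOFS =====

-- the substitution A's replace passes perform on every character
def subSp (c : Char) : Char := if PySem.Chars.isalpha c then c else ' '

-- the maximal alphabetic runs of cs, given a current (in-order) partial word cur
def Wruns : List Char → List Char → List (List Char)
  | [], cur => if cur = [] then [] else [cur]
  | c :: rest, cur =>
      if PySem.Chars.isalpha c then Wruns rest (cur ++ [c])
      else (if cur = [] then Wruns rest [] else cur :: Wruns rest [])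

lemma alpha_not_space (c : Char) (h : PySem.Chars.isalpha c = true) :
    PySem.Chars.isspace c = false := by
  have h' : (65 ≤ c.toNat ∧ c.toNat ≤ 90) ∨ (97 ≤ c.toNat ∧ c.toNat ≤ 122) := by
    simp only [PySem.Chars.isalpha, PySem.Chars.isupper, PySem.Chars.islower,
      Bool.or_eq_true, Bool.and_eq_true, decide_eq_true_eq, Char.le_def,
      UInt32.le_iff_toNat_le] at h
    exact h
  simp only [PySem.Chars.isspace, Bool.or_eq_false_iff, Bool.and_eq_false_iff,
    decide_eq_false_iff_not]
  omega

lemma isIn_singleton (c : Char) (s : List Char) :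
    PySem.Chars.isIn [c] s = true ↔ c ∈ s := by
  rw [PySem.Chars.isIn_iff_infix, List.singleton_infix_iff]

lemma replace_go_single (c : Char) :
    ∀ (fuel : Nat) (l acc : List Char), l.length ≤ fuel →
      PySem.Chars.replace.go [c] [' '] fuel l acc =
        acc.reverse ++ l.map (fun x => if x = c then ' ' else x) := by
  intro fuel
  induction fuel with
  | zero => intro l acc h; cases l with
    | nil => simp [PySem.Chars.replace.go]
    | cons x t => simp at h
  | succ n ih =>
    intro l acc h
    cases l with
    | nil => simp [PySem.Chars.replace.go]
    | cons x t =>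
      simp only [PySem.Chars.replace.go]
      by_cases hx : x = c
      · subst hx
        simp only [List.isPrefixOf, BEq.rfl, Bool.true_and, if_true]
        show PySem.Chars.replace.go [x] [' '] n t (' ' :: acc) = _
        rw [ih t (' ' :: acc) (by simpa using Nat.le_of_succ_le_succ h)]
        simp
      · have : [c].isPrefixOf (x :: t) = false := by
          simp [List.isPrefixOf]; exact fun hh => absurd hh.symm hx
        rw [this]
        simp only [Bool.false_eq_true, if_false]
        rw [ih t (x :: acc) (by simpa using Nat.le_of_succ_le_succ h)]
        simp [hx]

lemma replace_single (s : List Char) (c : Char) :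
    PySem.Chars.replace s [c] [' '] = s.map (fun x => if x = c then ' ' else x) := by
  simp only [PySem.Chars.replace, List.isEmpty_cons]
  exact (replace_go_single c s.length s [] (le_refl _)).trans (by simp)

-- noalpha's accumulator only grows
lemma noalpha_mono (cs : List Char) :
    ∀ (noa : List Char) (x : Char), x ∈ noa →
      x ∈ cs.foldl (fun noa c =>
        if !(PySem.Chars.isIn [c] noa || PySem.Chars.isalpha c) then noa ++ [c] else noa) noa := by
  induction cs with
  | nil => intro noa x hx; simpa using hx
  | cons c rest ih =>
    intro noa x hx
    simp only [List.foldl_cons]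
    split
    · exact ih _ _ (by simp [hx])
    · exact ih _ _ hx

-- every element of noalpha's result is non-alphabetic
lemma noalpha_P1 (cs : List Char) :
    ∀ (noa : List Char), (∀ x ∈ noa, PySem.Chars.isalpha x = false) →
      ∀ x ∈ cs.foldl (fun noa c =>
        if !(PySem.Chars.isIn [c] noa || PySem.Chars.isalpha c) then noa ++ [c] else noa) noa,
        PySem.Chars.isalpha x = false := by
  induction cs with
  | nil => intro noa h; simpa using h
  | cons c rest ih =>
    intro noa h
    simp only [List.foldl_cons]
    split
    · rename_i hcond
      apply ih
      intro x hx
      rcases List.mem_append.mp hx with hx | hx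
      · exact h x hx
      · simp at hx; subst hx
        simp only [Bool.not_eq_true', Bool.or_eq_false_iff] at hcond
        exact hcond.2
    · exact ih _ h

-- every non-alphabetic character of cs ends up in noalpha's result
lemma noalpha_P2 (cs : List Char) :
    ∀ (noa : List Char), ∀ x ∈ cs, PySem.Chars.isalpha x = false →
      x ∈ cs.foldl (fun noa c =>
        if !(PySem.Chars.isIn [c] noa || PySem.Chars.isalpha c) then noa ++ [c] else noa) noa := by
  induction cs with
  | nil => intro noa x hx; simp at hx
  | cons c rest ih =>
    intro noa x hx hal
    simp only [List.foldl_cons]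
    rcases List.mem_cons.mp hx with hx | hx
    · subst hx
      by_cases hin : PySem.Chars.isIn [x] noa || PySem.Chars.isalpha x
      · have hmem : x ∈ noa := by
          rcases Bool.or_eq_true_iff.mp hin with h | h
          · exact (isIn_singleton x noa).mp h
          · rw [hal] at h; exact absurd h (by simp)
        rw [if_neg (by simp [hin])]
        exact noalpha_mono rest noa x hmem
      · rw [if_pos (by simpa using hin)]
        exact noalpha_mono rest _ x (by simp)
    · split
      · exact ih _ x hx hal
      · exact ih _ x hx hal

-- a fold of single-char replaces is a map of the chained substitution
lemma replFold_map (noa : List Char) :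
    ∀ (s : List Char),
      noa.foldl (fun t c => PySem.Chars.replace t [c] [' ']) s =
        s.map (fun x => noa.foldl (fun y c => if y = c then ' ' else y) x) := by
  induction noa with
  | nil => intro s; simp
  | cons c rest ih =>
    intro s
    rw [List.foldl_cons, replace_single, ih, List.map_map]
    apply List.map_congr_left
    intro x _
    rfl

-- the chained substitution sends ' ' to ' '
lemma chain_space (l : List Char) :
    l.foldl (fun y c => if y = c then ' ' else y) ' ' = ' ' := by
  induction l with
  | nil => rfl
  | cons c rest ih => simp only [List.foldl_cons]; split <;> exact ih

lemma chain_alpha (l : List Char) (x : Char) (hx : PySem.Chars.isalpha x = true)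
    (hl : ∀ c ∈ l, PySem.Chars.isalpha c = false) :
    l.foldl (fun y c => if y = c then ' ' else y) x = x := by
  induction l with
  | nil => rfl
  | cons c rest ih =>
    simp only [List.foldl_cons]
    have hne : x ≠ c := by
      intro h; subst h
      rw [hl x (by simp)] at hx; exact absurd hx (by simp)
    rw [if_neg hne]
    exact ih (fun c hc => hl c (by simp [hc]))

lemma chain_mem (l : List Char) (x : Char) (hx : x ∈ l) :
    l.foldl (fun y c => if y = c then ' ' else y) x = ' ' := by
  induction l with
  | nil => simp at hx
  | cons c rest ih =>
    simp only [List.foldl_cons]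
    by_cases h : x = c
    · rw [if_pos h]; exact chain_space rest
    · rw [if_neg h]
      have h' : x ∈ rest := by
        rcases List.mem_cons.mp hx with h' | h'
        · exact absurd h' h
        · exact h'
      exact ih h' 

-- A's replace passes turn the line into its pointwise subSp image
lemma replFold_eq_map (s : List Char) :
    (noalphaA s).foldl (fun t c => PySem.Chars.replace t [c] [' ']) s = s.map subSp := by
  rw [replFold_map]
  simp only [noalphaA]
  apply List.map_congr_left
  intro x hx
  by_cases hal : PySem.Chars.isalpha x = true
  · rw [chain_alpha _ x hal (noalpha_P1 s [] (by simp)), subSp, if_pos hal]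
  · rw [chain_mem _ x (noalpha_P2 s [] x hx (by simpa using hal)), subSp, if_neg hal]

-- one-step unfoldings of split₀.go (definitional)
lemma split_go_nil (cur : List Char) (acc : List (List Char)) :
    PySem.Chars.split₀.go [] cur acc =
      if cur.isEmpty then acc.reverse else (cur.reverse :: acc).reverse := rfl

lemma split_go_cons (c : Char) (rest cur : List Char) (acc : List (List Char)) :
    PySem.Chars.split₀.go (c :: rest) cur acc =
      if PySem.Chars.isspace c then
        (if cur.isEmpty then PySem.Chars.split₀.go rest [] acc
         else PySem.Chars.split₀.go rest [] (cur.reverse :: acc))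
      else PySem.Chars.split₀.go rest (c :: cur) acc := rfl

-- split() of the subSp image computes the maximal alphabetic runs
lemma split₀_go_map (cs : List Char) :
    ∀ (cur : List Char) (acc : List (List Char)),
      PySem.Chars.split₀.go (cs.map subSp) cur acc = acc.reverse ++ Wruns cs cur.reverse := by
  induction cs with
  | nil =>
    intro cur acc
    rw [List.map_nil, split_go_nil, Wruns]
    by_cases h : cur = []
    · subst h; simp
    · rw [if_neg (by simpa using h), if_neg (by simpa using h)]
      simp
  | cons c rest ih =>
    intro cur acc
    rw [List.map_cons, split_go_cons, Wruns]
    by_cases hal : PySem.Chars.isalpha c = true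
    · have hsub : subSp c = c := by simp [subSp, hal]
      rw [hsub, if_neg (by simp [alpha_not_space c hal]), if_pos hal, ih (c :: cur) acc]
      simp
    · have hsub : subSp c = ' ' := by simp [subSp, hal]
      rw [hsub, if_pos (by decide), if_neg hal]
      by_cases h : cur = []
      · subst h
        simpa using ih [] acc
      · rw [if_neg (by simpa using h), if_neg (by simpa using h), ih [] (cur.reverse :: acc)]
        simp

lemma words_eq_Wruns (s : List Char) : wordsA s = Wruns s [] := by
  rw [wordsA, replFold_eq_map, PySem.Chars.split₀, split₀_go_map]
  simp

-- every emitted run is nonempty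
lemma Wruns_ne_nil (cs : List Char) :
    ∀ (cur : List Char), ∀ w ∈ Wruns cs cur, w ≠ [] := by
  induction cs with
  | nil =>
    intro cur w hw
    rw [Wruns] at hw
    split at hw
    · simp at hw
    · rename_i h; simp at hw; subst hw; exact h
  | cons c rest ih =>
    intro cur w hw
    rw [Wruns] at hw
    split at hw
    · exact ih _ w hw
    · split at hw
      · exact ih _ w hw
      · rename_i h
        rcases List.mem_cons.mp hw with hw | hw
        · subst hw; exact h
        · exact ih _ w hw

lemma join_cons_char (l : List (List Char)) (w : List Char) :
    PySem.Chars.join [' '] (w :: l) = w ++ l.flatMap (fun v => ' ' :: v) := by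
  induction l generalizing w with
  | nil => simp [PySem.Chars.join, List.intercalate]
  | cons v t ih =>
    simp only [PySem.Chars.join, List.intercalate] at ih ⊢
    rw [List.intersperse_cons₂, List.flatten_cons, List.flatten_cons, ih v, List.flatMap_cons]
    simp

-- A's parola loop, started from a nonempty parola, appends ' '-prefixed kept words
lemma foldA_nonempty (a b : Int) (ws : List (List Char)) :
    ∀ (p : List Char), p ≠ [] →
      ws.foldl (fun parola w =>
        if pvLenOk a b w then (if parola = [] then w else parola ++ ' ' :: w) else parola) p =
      p ++ (ws.filter (pvLenOk a b)).flatMap (fun w => ' ' :: w) := by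
  induction ws with
  | nil => intro p hp; simp
  | cons w rest ih =>
    intro p hp
    simp only [List.foldl_cons, List.filter_cons]
    by_cases hw : pvLenOk a b w = true
    · simp only [hw, if_true, if_neg hp]
      rw [ih (p ++ ' ' :: w) (by simp)]
      simp
    · simp only [hw, Bool.false_eq_true, if_false]
      exact ih p hp

-- A's parola loop from '' is the space-join of the kept words
lemma foldA_join (a b : Int) (ws : List (List Char)) (hne : ∀ w ∈ ws, w ≠ []) :
    ws.foldl (fun parola w =>
      if pvLenOk a b w then (if parola = [] then w else parola ++ ' ' :: w) else parola) [] =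
    PySem.Chars.join [' '] (ws.filter (pvLenOk a b)) := by
  induction ws with
  | nil => simp [PySem.Chars.join, List.intercalate]
  | cons w rest ih =>
    simp only [List.foldl_cons, List.filter_cons]
    by_cases hw : pvLenOk a b w = true
    · simp only [hw, if_true]
      rw [foldA_nonempty a b rest w (hne w (by simp))]
      rw [join_cons_char]
    · simp only [hw, Bool.false_eq_true, if_false]
      exact ih (fun v hv => hne v (by simp [hv]))

-- one-step unfolding of flushB (definitional)
lemma flushB_eq (a b : Int) (parts : List (List Char)) (buf : List Char) :
    flushB a b (parts, buf) =
      if (!buf.isEmpty && pvLenOk a b buf) = true then parts ++ [buf] else parts := rfl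

-- B's scan accumulates exactly the kept runs
lemma foldB_runs (a b : Int) (cs : List Char) :
    ∀ (parts : List (List Char)) (buf : List Char),
      flushB a b (cs.foldl (stepB a b) (parts, buf)) =
        parts ++ (Wruns cs buf).filter (fun w => !w.isEmpty && pvLenOk a b w) := by
  induction cs with
  | nil =>
    intro parts buf
    rw [List.foldl_nil, flushB_eq a b parts buf, Wruns]
    by_cases h : buf = []
    · subst h; simp
    · rw [if_neg h, List.filter_cons, List.filter_nil]
      by_cases hk : (!buf.isEmpty && pvLenOk a b buf) = true
      · rw [if_pos hk, if_pos hk]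
      · rw [if_neg hk, if_neg hk, List.append_nil]
  | cons c rest ih =>
    intro parts buf
    rw [List.foldl_cons, Wruns]
    by_cases hal : PySem.Chars.isalpha c = true
    · rw [if_pos hal]
      have hst : stepB a b (parts, buf) c = (parts, buf ++ [c]) := by simp [stepB, hal]
      rw [hst, ih parts (buf ++ [c])]
    · rw [if_neg hal]
      have hst : stepB a b (parts, buf) c = (flushB a b (parts, buf), []) := by
        simp [stepB, hal]
      rw [hst, flushB_eq a b parts buf]
      by_cases h : buf = []
      · subst h
        rw [if_pos rfl]
        have he : (if (!List.isEmpty ([] : List Char) && pvLenOk a b []) = true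
            then parts ++ [([] : List Char)] else parts) = parts := by simp
        rw [he, ih parts []]
      · rw [if_neg h, List.filter_cons]
        by_cases hk : (!buf.isEmpty && pvLenOk a b buf) = true
        · rw [if_pos hk, if_pos hk, ih (parts ++ [buf]) []]
          simp
        · rw [if_neg hk, if_neg hk, ih parts []]

-- the two per-line computations agree
lemma line_eq (a b : Int) (r : List Char) : lineA a b r = lineB a b r := by
  rw [lineA, words_eq_Wruns, foldA_join a b _ (Wruns_ne_nil r []),
    lineB, foldB_runs a b r [] []]
  congr 1
  simp only [List.nil_append]
  apply List.filter_congr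
  intro w hw
  have := Wruns_ne_nil r [] w hw
  simp [this]

-- ===== VERDICT (by name: the statement is the Claim_ definition above) =====
theorem parole_spec : Claim_equal_parole := by
  intro a b txt _
  unfold Spec_parole parole parole_alt
  exact List.map_congr_left (fun r _ => by rw [line_eq])
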